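-- pv_equiv track=rewrite | github.com/Windowline/customized-xy-cut | left_firsrt_xy_cut.py | split_by_first_zero_gap
-- ===== SOURCE A (Python) =====
-- def split_by_first_zero_gap(proj, min_gap=1):
--     ret_interval = [None, None]
--
--     for i in range(len(proj)):
--         if proj[i] >= 1 and ret_interval[0] is None:
--             ret_interval[0] = i
--         elif proj[i] == 0 and ret_interval[0] is not None:
--             ret_interval[1] = i
--
--         if all(v is not None for v in ret_interval):
--             if ret_interval[1] - ret_interval[0] >= min_gap:
--                 return ret_interval
--             else:
--                 ret_interval = [None, None]
--
--     return ret_interval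
-- ===== SOURCE B (Python) =====
-- def split_by_first_zero_gap(proj, min_gap=1):
--     n = len(proj)
--     i = 0
--     while i < n:
--         if proj[i] < 1:          # phase 1: advance to the next start (proj[i] >= 1)
--             i += 1
--             continue
--         start = i
--         j = start                # phase 2: advance to the first zero at or after start
--         while j < n and proj[j] != 0:
--             j += 1
--         if j == n:
--             return [start, None]
--         if j - start >= min_gap:
--             return [start, j]
--         i = j + 1                # gap too small: resume the scan after the zero
--     return [None, None]
-- ===== Notes on version B (the rewrite author's own statement) =====
-- stated objective: faster
-- what changed: Replaces A's sentinel-pair [start,end] state machine over a single for-loop (with a per-iteration all()-check and list reallocations) by a pointer-driven two-phase scan: an outer loop finds the next start (proj[i] >= 1), an inner loop finds the first zero after it, and on an insufficient gap the scan resumes just past that zero.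
import Mathlib
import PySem

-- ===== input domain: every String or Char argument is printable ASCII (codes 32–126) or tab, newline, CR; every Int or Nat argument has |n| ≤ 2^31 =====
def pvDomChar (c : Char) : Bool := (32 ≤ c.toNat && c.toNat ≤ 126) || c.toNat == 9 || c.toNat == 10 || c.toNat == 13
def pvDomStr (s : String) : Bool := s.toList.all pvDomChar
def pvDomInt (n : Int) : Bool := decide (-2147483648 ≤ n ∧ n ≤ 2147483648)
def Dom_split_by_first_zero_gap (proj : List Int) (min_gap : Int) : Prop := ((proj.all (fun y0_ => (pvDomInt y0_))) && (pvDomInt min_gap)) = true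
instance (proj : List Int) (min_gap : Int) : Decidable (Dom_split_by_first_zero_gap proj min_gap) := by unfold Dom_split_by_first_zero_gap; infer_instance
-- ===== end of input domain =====

-- B replaces A's sentinel-pair state machine by a two-phase pointer scan (find start, then find zero, retry past it); alternative decomposition, same O(n) cost.

-- ===== PORT A =====
-- state = ret_interval (pair of Options); loop over range(len(proj)); indices produced by range are in range, so getD is exact for proj[i]
def splitA_go (proj : List Int) (min_gap : Int) : List Nat → Option Int × Option Int → List (Option Int)
  | [], (a, b) => [a, b]
  | i :: rest, (a, b) =>
    let g := proj.getD i 0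
    let st : Option Int × Option Int :=
      if g ≥ 1 ∧ a = none then (some (i : Int), b)
      else if g = 0 ∧ a ≠ none then (a, some (i : Int))
      else (a, b)
    match st with
    | (some s, some e) =>
      if e - s ≥ min_gap then [some s, some e]
      else splitA_go proj min_gap rest (none, none)
    | (a', b') => splitA_go proj min_gap rest (a', b')

def split_by_first_zero_gap (proj : List Int) (min_gap : Int) : List (Option Int) :=
  splitA_go proj min_gap (List.range proj.length) (none, none)

-- ===== PORT B =====
-- inner while of Source B: advance j while j < n and proj[j] != 0 (none = ran off the end)
def findZero (proj : List Int) (j : Nat) : Option Nat :=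
  if _h : j < proj.length then
    if proj.getD j 0 ≠ 0 then findZero proj (j + 1) else some j
  else none
termination_by proj.length - j

theorem findZero_ge (proj : List Int) (j : Nat) :
    ∀ z, findZero proj j = some z → j ≤ z ∧ z < proj.length := by
  induction hn : proj.length - j using Nat.strong_induction_on generalizing j with
  | _ n ih =>
    subst hn
    intro z hz
    unfold findZero at hz
    by_cases h : j < proj.length
    · rw [dif_pos h] at hz
      by_cases h0 : proj.getD j 0 = 0
      · rw [if_neg (not_not_intro h0)] at hz
        cases hz; omega
      · rw [if_pos h0] at hz
        have := ih (proj.length - (j + 1)) (by omega) (j + 1) rfl z hz; omega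
    · rw [dif_neg h] at hz; cases hz

-- outer while of Source B over i
def splitB_go (proj : List Int) (min_gap : Int) (i : Nat) : List (Option Int) :=
  if _h : i < proj.length then
    if proj.getD i 0 < 1 then splitB_go proj min_gap (i + 1)
    else
      match hz : findZero proj i with
      | none => [some (i : Int), none]
      | some j =>
        if (j : Int) - (i : Int) ≥ min_gap then [some (i : Int), some (j : Int)]
        else splitB_go proj min_gap (j + 1)
  else [none, none]
termination_by proj.length - i
decreasing_by
  · omega
  · have := findZero_ge proj i j hz; omega

def split_by_first_zero_gap_alt (proj : List Int) (min_gap : Int) : List (Option Int) :=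
  splitB_go proj min_gap 0

-- ===== PRECONDITION & SPEC =====
def Spec_split_by_first_zero_gap (proj : List Int) (min_gap : Int) (out : List (Option Int)) : Prop := out = split_by_first_zero_gap_alt proj min_gap
instance (proj : List Int) (min_gap : Int) (out : List (Option Int)) : Decidable (Spec_split_by_first_zero_gap proj min_gap out) := by unfold Spec_split_by_first_zero_gap; infer_instance

-- ===== CLAIM (what is proved, stated in full; the proofs are below) =====
def Claim_equal_split_by_first_zero_gap : Prop := ∀ (proj : List Int) (min_gap : Int), Dom_split_by_first_zero_gap proj min_gap → Spec_split_by_first_zero_gap proj min_gap (split_by_first_zero_gap proj min_gap)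

-- ===== LEMMAS AND PROOFS =====

-- step lemmas for findZero
theorem findZero_end (proj : List Int) (j : Nat) (h : ¬ j < proj.length) :
    findZero proj j = none := by
  rw [findZero, dif_neg h]

theorem findZero_stop (proj : List Int) (j : Nat) (h : j < proj.length)
    (h0 : proj.getD j 0 = 0) : findZero proj j = some j := by
  rw [findZero, dif_pos h, if_neg (not_not_intro h0)]

theorem findZero_skip (proj : List Int) (j : Nat) (h : j < proj.length)
    (h0 : proj.getD j 0 ≠ 0) : findZero proj j = findZero proj (j + 1) := by
  conv_lhs => rw [findZero]
  rw [dif_pos h, if_pos h0]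

-- step lemmas for splitA_go
theorem splitA_none_lt (proj : List Int) (min_gap : Int) (i : Nat) (rest : List Nat)
    (hlt : proj.getD i 0 < 1) :
    splitA_go proj min_gap (i :: rest) (none, none) = splitA_go proj min_gap rest (none, none) := by
  simp only [splitA_go]
  rw [if_neg (by rintro ⟨h1, -⟩; omega), if_neg (by rintro ⟨-, h2⟩; simp at h2)]

theorem splitA_none_ge (proj : List Int) (min_gap : Int) (i : Nat) (rest : List Nat)
    (hge : proj.getD i 0 ≥ 1) :
    splitA_go proj min_gap (i :: rest) (none, none)
      = splitA_go proj min_gap rest (some (i : Int), none) := by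
  simp only [splitA_go]
  rw [if_pos ⟨hge, by trivial⟩]

theorem splitA_some_ne (proj : List Int) (min_gap : Int) (s : Int) (i : Nat) (rest : List Nat)
    (h0 : proj.getD i 0 ≠ 0) :
    splitA_go proj min_gap (i :: rest) (some s, none)
      = splitA_go proj min_gap rest (some s, none) := by
  simp only [splitA_go]
  rw [if_neg (by rintro ⟨-, h2⟩; simp at h2), if_neg (by rintro ⟨h2, -⟩; exact h0 h2)]

theorem splitA_some_zero (proj : List Int) (min_gap : Int) (s : Int) (i : Nat) (rest : List Nat)
    (h0 : proj.getD i 0 = 0) :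
    splitA_go proj min_gap (i :: rest) (some s, none)
      = if (i : Int) - s ≥ min_gap then [some s, some (i : Int)]
        else splitA_go proj min_gap rest (none, none) := by
  simp only [splitA_go]
  rw [if_neg (by rintro ⟨-, h2⟩; simp at h2), if_pos ⟨h0, by simp⟩]

-- A's loop from index j with the start s already recorded = B's zero search from j, with retry
theorem splitA_zero_phase (proj : List Int) (min_gap : Int) (s : Int) :
    ∀ j, splitA_go proj min_gap (List.range' j (proj.length - j)) (some s, none)
      = match findZero proj j with
        | none => [some s, none]
        | some z =>
          if (z : Int) - s ≥ min_gap then [some s, some (z : Int)]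
          else splitA_go proj min_gap (List.range' (z + 1) (proj.length - (z + 1))) (none, none) := by
  intro j
  induction hn : proj.length - j using Nat.strong_induction_on generalizing j with
  | _ n ih =>
    subst hn
    by_cases h : j < proj.length
    · rw [show proj.length - j = (proj.length - (j + 1)) + 1 by omega, List.range'_succ]
      by_cases h0 : proj.getD j 0 = 0
      · rw [splitA_some_zero proj min_gap s j _ h0, findZero_stop proj j h h0]
      · rw [splitA_some_ne proj min_gap s j _ h0,
            ih (proj.length - (j + 1)) (by omega) (j + 1) rfl,
            findZero_skip proj j h h0]
    · rw [show proj.length - j = 0 by omega, findZero_end proj j h]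
      rfl

theorem splitA_eq_splitB (proj : List Int) (min_gap : Int) :
    ∀ i, splitA_go proj min_gap (List.range' i (proj.length - i)) (none, none)
      = splitB_go proj min_gap i := by
  intro i
  induction hn : proj.length - i using Nat.strong_induction_on generalizing i with
  | _ n ih =>
    subst hn
    conv_rhs => rw [splitB_go]
    by_cases h : i < proj.length
    · rw [dif_pos h,
          show proj.length - i = (proj.length - (i + 1)) + 1 by omega, List.range'_succ]
      by_cases hlt : proj.getD i 0 < 1
      · rw [splitA_none_lt proj min_gap i _ hlt, if_pos hlt,
            ih (proj.length - (i + 1)) (by omega) (i + 1) rfl]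
      · rw [splitA_none_ge proj min_gap i _ (by omega), if_neg hlt,
            splitA_zero_phase proj min_gap (i : Int) (i + 1),
            ← findZero_skip proj i h (by omega)]
        cases hfz : findZero proj i with
        | none => rfl
        | some z =>
          simp only
          by_cases hg : (z : Int) - (i : Int) ≥ min_gap
          · rw [if_pos hg, if_pos hg]
          · rw [if_neg hg, if_neg hg,
                ih (proj.length - (z + 1))
                  (by have := findZero_ge proj i z hfz; omega) (z + 1) rfl]
    · rw [dif_neg h, show proj.length - i = 0 by omega]
      rfl

-- ===== VERDICT (by name: the statement is the Claim_ definition above) =====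
theorem split_by_first_zero_gap_spec : Claim_equal_split_by_first_zero_gap := by
  intro proj min_gap _
  unfold Spec_split_by_first_zero_gap split_by_first_zero_gap split_by_first_zero_gap_alt
  have := splitA_eq_splitB proj min_gap 0
  simpa [List.range_eq_range'] using this
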